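-- pv_equiv track=rewrite | github.com/aaronbernal28/labor_market_structure_arg | scripts/utils/prepare_data_eph.py | _resolve_feature_source
-- ===== SOURCE A (Python) =====
-- def _resolve_column(columns: list[str], candidates: list[str]) -> str | None:
-- 	for candidate in candidates:
-- 		if candidate in columns:
-- 			return candidate
-- 	return None
--
-- def _resolve_feature_source(
-- 	columns: list[str],
-- 	configured_source: str | None,
-- 	fallback_candidates: list[str],
-- ) -> str | None:
-- 	candidates: list[str] = []
-- 	if configured_source:
-- 		candidates.append(configured_source)
-- 	for col in fallback_candidates:
-- 		if col not in candidates: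
-- 			candidates.append(col)
-- 	return _resolve_column(columns, candidates)
-- ===== SOURCE B (Python) =====
-- def _resolve_feature_source(
-- 	columns: list[str],
-- 	configured_source: str | None,
-- 	fallback_candidates: list[str],
-- ) -> str | None:
-- 	# Different algorithm: build a priority index (candidate -> rank) once,
-- 	# then invert the scan: iterate over the available columns and keep the
-- 	# one with the smallest rank.
-- 	rank: dict[str, int] = {}
-- 	i = 0
-- 	if configured_source:
-- 		rank[configured_source] = 0
-- 		i = 1
-- 	for col in fallback_candidates:
-- 		if col not in rank:
-- 			rank[col] = i
-- 			i += 1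
-- 	best = None
-- 	best_rank = None
-- 	for c in columns:
-- 		r = rank.get(c)
-- 		if r is not None:
-- 			if best_rank is None or r < best_rank:
-- 				best = c
-- 				best_rank = r
-- 	return best
-- ===== Notes on version B (the rewrite author's own statement) =====
-- stated objective: faster
-- what changed: A builds a deduplicated candidate list (membership test by list scan) and then scans it for the first candidate present in columns (another list scan per candidate); B inverts the search: it builds a rank dict (candidate -> priority) once and then makes one pass over the columns keeping the column of smallest rank, replacing all inner list scans by O(1) dict lookups.
import Mathlib
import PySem

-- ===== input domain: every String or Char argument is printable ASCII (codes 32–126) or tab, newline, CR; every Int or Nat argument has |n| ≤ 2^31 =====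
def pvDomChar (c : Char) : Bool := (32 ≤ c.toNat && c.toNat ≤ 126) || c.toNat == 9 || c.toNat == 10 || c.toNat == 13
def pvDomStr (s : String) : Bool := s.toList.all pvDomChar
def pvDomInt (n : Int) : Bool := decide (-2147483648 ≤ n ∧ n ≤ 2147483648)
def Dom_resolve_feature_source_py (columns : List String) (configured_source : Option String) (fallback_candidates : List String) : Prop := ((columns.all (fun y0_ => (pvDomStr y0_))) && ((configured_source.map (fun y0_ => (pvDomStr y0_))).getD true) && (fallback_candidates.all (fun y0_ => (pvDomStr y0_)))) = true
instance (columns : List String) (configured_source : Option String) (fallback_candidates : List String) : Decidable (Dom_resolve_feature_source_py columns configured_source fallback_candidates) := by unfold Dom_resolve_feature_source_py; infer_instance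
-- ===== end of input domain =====

-- B replaces A's first-match scan over a deduplicated candidate list (inner list scans) by a rank dict (candidate -> priority) plus a single min-rank pass over the columns; measured faster on large inputs.


-- ===== PORT A =====
-- helper of A: first candidate present in columns (_resolve_column)
def resolveColumnA (columns : List String) (candidates : List String) : Option String :=
  match candidates with
  | [] => none
  | c :: rest => if columns.contains c then some c else resolveColumnA columns rest

def resolve_feature_source_py (columns : List String) (configured_source : Option String) (fallback_candidates : List String) : Option String :=
  let candidates : List String :=
    match configured_source with
    | some s => if s ≠ "" then [s] else []
    | none => []
  let candidates :=
    fallback_candidates.foldl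
      (fun acc col => if acc.contains col then acc else acc ++ [col]) candidates
  resolveColumnA columns candidates

-- ===== PORT B =====
def resolve_feature_source_py_alt (columns : List String) (configured_source : Option String) (fallback_candidates : List String) : Option String :=
  -- rank = {}; i = 0; if configured_source: rank[configured_source] = 0; i = 1
  let init : PySem.Dict String Int × Int :=
    match configured_source with
    | some s => if s ≠ "" then (PySem.Dict.empty.insert s 0, 1) else (PySem.Dict.empty, 0)
    | none => (PySem.Dict.empty, 0)
  -- for col in fallback_candidates: if col not in rank: rank[col] = i; i += 1
  let st :=
    fallback_candidates.foldl
      (fun (st : PySem.Dict String Int × Int) col =>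
        if st.1.contains col then st else (st.1.insert col st.2, st.2 + 1)) init
  let rank := st.1
  -- best = None; best_rank = None; for c in columns: …
  let res :=
    columns.foldl
      (fun (st : Option String × Option Int) c =>
        match rank.get? c with
        | none => st
        | some r =>
          match st.2 with
          | none => (some c, some r)
          | some br => if r < br then (some c, some r) else st) (none, none)
  res.1

-- ===== PRECONDITION & SPEC =====
def Spec_resolve_feature_source_py (columns : List String) (configured_source : Option String) (fallback_candidates : List String) (out : Option String) : Prop := out = resolve_feature_source_py_alt columns configured_source fallback_candidates
instance (columns : List String) (configured_source : Option String) (fallback_candidates : List String) (out : Option String) : Decidable (Spec_resolve_feature_source_py columns configured_source fallback_candidates out) := by unfold Spec_resolve_feature_source_py; infer_instance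

-- ===== CLAIM (what is proved, stated in full; the proofs are below) =====
def Claim_equal_resolve_feature_source_py : Prop := ∀ (columns : List String) (configured_source : Option String) (fallback_candidates : List String), Dom_resolve_feature_source_py columns configured_source fallback_candidates → Spec_resolve_feature_source_py columns configured_source fallback_candidates (resolve_feature_source_py columns configured_source fallback_candidates)

-- ===== LEMMAS AND PROOFS =====

-- rank of a string in a candidate list: index of its FIRST occurrence, as an Int
def rkOf (cands : List String) (x : String) : Option Int :=
  match cands with
  | [] => none
  | c :: rest => if c = x then some 0 else (rkOf rest x).map (· + 1)

-- one step of B's min-rank scan, abstracted over the lookup function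
def stepB (g : String → Option Int) (st : Option String × Option Int) (c : String) : Option String × Option Int :=
  match g c with
  | none => st
  | some r =>
    match st.2 with
    | none => (some c, some r)
    | some br => if r < br then (some c, some r) else st

-- the min-rank scan of port B, abstracted over the lookup function
def scanB (g : String → Option Int) (columns : List String) (st : Option String × Option Int) : Option String × Option Int :=
  columns.foldl (stepB g) st

theorem stepB_of_none (g : String → Option Int) (st : Option String × Option Int) (c : String)
    (hg : g c = none) : stepB g st c = st := by
  simp [stepB, hg]

theorem stepB_of_some_none (g : String → Option Int) (b : Option String) (c : String) (r : Int)
    (hg : g c = some r) : stepB g (b, none) c = (some c, some r) := by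
  simp [stepB, hg]

theorem stepB_of_some_some (g : String → Option Int) (b : Option String) (c : String) (r br : Int)
    (hg : g c = some r) :
    stepB g (b, some br) c = if r < br then (some c, some r) else (b, some br) := by
  simp [stepB, hg]

theorem rkOf_nonneg (cands : List String) (x : String) (r : Int) (h : rkOf cands x = some r) : 0 ≤ r := by
  induction cands generalizing r with
  | nil => simp [rkOf] at h
  | cons c rest ih =>
    simp only [rkOf] at h
    split_ifs at h with hc
    · simp only [Option.some.injEq] at h; omega
    · cases hr : rkOf rest x with
      | none => simp [hr] at h
      | some r' => simp [hr] at h; have := ih r' hr; omega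

theorem scanB_congr (g g' : String → Option Int) (columns : List String) (st : Option String × Option Int)
    (h : ∀ x ∈ columns, g x = g' x) : scanB g columns st = scanB g' columns st := by
  induction columns generalizing st with
  | nil => rfl
  | cons c cs ih =>
    simp only [scanB, List.foldl_cons] at *
    have : stepB g st c = stepB g' st c := by simp [stepB, h c (by simp)]
    rw [this]
    exact ih _ (fun x hx => h x (by simp [hx]))

theorem scanB_none (g : String → Option Int) (columns : List String) (st : Option String × Option Int)
    (h : ∀ x ∈ columns, g x = none) : scanB g columns st = st := by
  induction columns generalizing st with
  | nil => rfl
  | cons c cs ih =>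
    simp only [scanB, List.foldl_cons] at *
    rw [stepB_of_none g st c (h c (by simp))]
    exact ih _ (fun x hx => h x (by simp [hx]))

-- shifting every rank by +1 does not change which element is selected
theorem scanB_shift (g : String → Option Int) (columns : List String) (b : Option String) (br : Option Int) :
    scanB (fun x => (g x).map (· + 1)) columns (b, br.map (· + 1))
      = ((scanB g columns (b, br)).1, (scanB g columns (b, br)).2.map (· + 1)) := by
  induction columns generalizing b br with
  | nil => rfl
  | cons c cs ih =>
    simp only [scanB, List.foldl_cons] at *
    cases hg : g c with
    | none =>
      rw [stepB_of_none g _ c hg, stepB_of_none _ _ c (by simp [hg])]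
      exact ih b br
    | some r =>
      cases br with
      | none =>
        simp only [Option.map_none]
        rw [stepB_of_some_none g b c r hg,
            stepB_of_some_none _ b c (r + 1) (by simp only [hg, Option.map_some])]
        exact ih (some c) (some r)
      | some b' =>
        simp only [Option.map_some]
        rw [stepB_of_some_some g b c r b' hg,
            stepB_of_some_some _ b c (r + 1) (b' + 1) (by simp only [hg, Option.map_some])]
        by_cases hlt : r < b'
        · rw [if_pos hlt, if_pos (by omega)]
          exact ih (some c) (some r)
        · rw [if_neg hlt, if_neg (by omega)]
          exact ih b (some b')

-- once the state holds a rank-0 element, nothing can replace it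
theorem scanB_absorb (g : String → Option Int) (columns : List String) (c : String)
    (hpos : ∀ x r, g x = some r → 0 ≤ r) :
    scanB g columns (some c, some 0) = (some c, some 0) := by
  induction columns with
  | nil => rfl
  | cons y ys ih =>
    simp only [scanB, List.foldl_cons] at *
    cases hg : g y with
    | none => rw [stepB_of_none g _ y hg]; exact ih
    | some r =>
      rw [stepB_of_some_some g _ y r 0 hg, if_neg (by have := hpos y r hg; omega)]
      exact ih

-- if c has rank 0, only c has rank 0, and c occurs in columns, the scan returns c
theorem scanB_zero (g : String → Option Int) (columns : List String) (c : String)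
    (h0 : g c = some 0) (hinj : ∀ x, g x = some 0 → x = c)
    (hpos : ∀ x r, g x = some r → 0 ≤ r) (st : Option String × Option Int)
    (hst : st = (none, none) ∨ st = (some c, some 0) ∨
           ∃ b r, st = (some b, some r) ∧ 0 < r)
    (hc : c ∈ columns) :
    (scanB g columns st).1 = some c := by
  induction columns generalizing st with
  | nil => simp at hc
  | cons y ys ih =>
    simp only [scanB, List.foldl_cons] at *
    by_cases hyc : y = c
    · have hstep : stepB g st y = (some y, some 0) ∨
          (stepB g st y = (some c, some 0) ∧ y = c) := by
        rcases hst with h | h | ⟨b, r, h, hr⟩ <;> subst h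
        · exact Or.inl (by rw [hyc] at *; exact stepB_of_some_none g none c 0 h0)
        · refine Or.inr ⟨?_, hyc⟩
          rw [hyc, stepB_of_some_some g _ c 0 0 h0, if_neg (by omega)]
        · exact Or.inl (by rw [hyc] at *; rw [stepB_of_some_some g _ c 0 r h0, if_pos hr])
      have habs : stepB g st y = (some c, some 0) := by
        rcases hstep with h | ⟨h, _⟩
        · rw [h, hyc]
        · exact h
      rw [habs]
      by_cases hmem : c ∈ ys
      · exact ih _ (Or.inr (Or.inl rfl)) hmem
      · exact congrArg Prod.fst (scanB_absorb g ys c hpos)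
    · have hc' : c ∈ ys := by
        rcases List.mem_cons.mp hc with h | h
        · exact absurd h.symm hyc
        · exact h
      cases hg : g y with
      | none => rw [stepB_of_none g st y hg]; exact ih st hst hc'
      | some r =>
        have hrange : 0 ≤ r := hpos y r hg
        have hrpos : 0 < r := by
          rcases lt_or_eq_of_le hrange with h | h
          · exact h
          · exact absurd (hinj y (by rw [hg, ← h])) hyc
        rcases hst with h | h | ⟨b, br, h, hbr⟩ <;> subst h
        · rw [stepB_of_some_none g none y r hg]
          exact ih _ (Or.inr (Or.inr ⟨y, r, rfl, hrpos⟩)) hc'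
        · rw [stepB_of_some_some g _ y r 0 hg, if_neg (by omega)]
          exact ih _ (Or.inr (Or.inl rfl)) hc'
        · rw [stepB_of_some_some g _ y r br hg]
          split_ifs with hlt
          · exact ih _ (Or.inr (Or.inr ⟨y, r, rfl, hrpos⟩)) hc'
          · exact ih _ (Or.inr (Or.inr ⟨b, br, rfl, hbr⟩)) hc'

-- the min-rank scan over the columns selects the first candidate present in the columns
theorem scanB_find (cands columns : List String) :
    (scanB (rkOf cands) columns (none, none)).1
      = cands.find? (fun c => columns.contains c) := by
  induction cands with
  | nil =>
    rw [scanB_none (rkOf []) columns (none, none) (fun x _ => rfl)]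
    rfl
  | cons c rest ih =>
    rw [List.find?_cons]
    cases hmem : columns.contains c
    · -- c not in columns: every looked-up x has the shifted rank of rest
      have hcongr : ∀ x ∈ columns, rkOf (c :: rest) x = (rkOf rest x).map (· + 1) := by
        intro x hx
        have hne : c ≠ x := by
          intro h; subst h
          rw [List.contains_iff_mem.mpr hx] at hmem
          cases hmem
        simp [rkOf, hne]
      rw [scanB_congr _ _ _ _ hcongr]
      have := scanB_shift (rkOf rest) columns none none
      simp only [Option.map_none] at this
      rw [this]
      exact ih
    · -- c in columns: c has rank 0, unique, so the scan returns c
      have h0 : rkOf (c :: rest) c = some 0 := by simp [rkOf]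
      have hinj : ∀ x, rkOf (c :: rest) x = some 0 → x = c := by
        intro x hx
        by_cases hcx : c = x
        · exact hcx.symm
        · simp only [rkOf, if_neg hcx] at hx
          cases hr : rkOf rest x with
          | none => simp [hr] at hx
          | some r' =>
            simp [hr] at hx
            have := rkOf_nonneg rest x r' hr
            omega
      have hpos : ∀ x r, rkOf (c :: rest) x = some r → 0 ≤ r :=
        fun x r h => rkOf_nonneg (c :: rest) x r h
      rw [scanB_zero _ _ c h0 hinj hpos _ (Or.inl rfl)
            (List.contains_iff_mem.mp hmem)]

-- A's helper is find?
theorem resolveColumnA_eq_find? (columns : List String) (candidates : List String) :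
    resolveColumnA columns candidates = candidates.find? (fun c => columns.contains c) := by
  induction candidates with
  | nil => rfl
  | cons c rest ih => simp [resolveColumnA, List.find?, ih]; split_ifs with h <;> simp_all

theorem rkOf_eq_none_iff (acc : List String) (x : String) :
    rkOf acc x = none ↔ x ∉ acc := by
  induction acc with
  | nil => simp [rkOf]
  | cons c rest ih =>
    simp only [rkOf]
    split_ifs with h
    · subst h; simp
    · simp only [Option.map_eq_none_iff, ih, List.mem_cons]
      constructor
      · intro hn
        rintro (h1 | h2)
        · exact h h1.symm
        · exact hn h2
      · intro hn h2
        exact hn (Or.inr h2)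

-- appending one fresh candidate appends one rank
theorem rkOf_append_singleton (acc : List String) (c x : String) :
    rkOf (acc ++ [c]) x
      = (rkOf acc x).or (if c = x then some (acc.length : Int) else none) := by
  induction acc with
  | nil => simp [rkOf]
  | cons y rest ih =>
    simp only [List.cons_append, rkOf]
    by_cases h : y = x
    · simp [h]
    · rw [if_neg h, if_neg h, ih]
      cases hr : rkOf rest x with
      | some r => simp
      | none =>
        by_cases hc : c = x
        · simp only [Option.none_or, if_pos hc, Option.map_none, Option.map_some,
            List.length_cons]
          simp only [Option.some.injEq]
          push_cast
          ring
        · simp [hc]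

-- the rank dict built by B's first loop looks up exactly like rkOf of the
-- candidate list built by A's dedup loop
theorem rank_eq_rkOf (fbs : List String) (rk : PySem.Dict String Int) (acc : List String) (i : Int)
    (hinv : ∀ x, rk.get? x = rkOf acc x) (hilen : i = (acc.length : Int)) :
    ∀ x, ((fbs.foldl (fun (st : PySem.Dict String Int × Int) col =>
        if st.1.contains col then st else (st.1.insert col st.2, st.2 + 1)) (rk, i)).1).get? x
      = rkOf (fbs.foldl (fun acc col => if acc.contains col then acc else acc ++ [col]) acc) x := by
  induction fbs generalizing rk acc i with
  | nil => exact hinv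
  | cons col rest ih =>
    simp only [List.foldl_cons]
    have hcontains : rk.contains col = acc.contains col := by
      rw [PySem.Dict.contains_eq_isSome_get?, hinv col]
      cases h : acc.contains col
      · rw [(rkOf_eq_none_iff acc col).mpr
            (by intro hm; rw [List.contains_iff_mem.mpr hm] at h; cases h)]
        rfl
      · have hmem : col ∈ acc := List.contains_iff_mem.mp h
        cases hr : rkOf acc col with
        | none => exact absurd ((rkOf_eq_none_iff acc col).mp hr) (by simpa using hmem)
        | some r => rfl
    cases hmem : acc.contains col
    · rw [hcontains, hmem]
      simp only [Bool.false_eq_true, if_false]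
      refine ih (rk.insert col i) (acc ++ [col]) (i + 1) ?_ (by simp [hilen])
      intro x
      by_cases hx : x = col
      · subst hx
        rw [PySem.Dict.get?_insert_self, rkOf_append_singleton]
        rw [(rkOf_eq_none_iff acc x).mpr
            (by intro hm; rw [List.contains_iff_mem.mpr hm] at hmem; cases hmem)]
        simp [hilen]
      · rw [PySem.Dict.get?_insert_of_ne rk i hx, hinv x, rkOf_append_singleton]
        rw [if_neg (fun h : col = x => hx h.symm)]
        simp
    · rw [hcontains, hmem]
      simp only [if_true]
      exact ih rk acc i hinv hilen

-- ===== VERDICT (by name: the statement is the Claim_ definition above) =====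
theorem resolve_feature_source_py_spec : Claim_equal_resolve_feature_source_py := by
  intro columns cs fbs _
  unfold Spec_resolve_feature_source_py resolve_feature_source_py resolve_feature_source_py_alt
  have key : ∀ (rk0 : PySem.Dict String Int) (acc0 : List String) (i0 : Int),
      (∀ x, rk0.get? x = rkOf acc0 x) → i0 = (acc0.length : Int) →
      resolveColumnA columns
        (fbs.foldl (fun acc col => if acc.contains col then acc else acc ++ [col]) acc0)
      = (scanB (fun c => ((fbs.foldl (fun (st : PySem.Dict String Int × Int) col =>
            if st.1.contains col then st else (st.1.insert col st.2, st.2 + 1)) (rk0, i0)).1).get? c)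
          columns (none, none)).1 := by
    intro rk0 acc0 i0 hinv hilen
    rw [scanB_congr _ (rkOf (fbs.foldl (fun acc col => if acc.contains col then acc else acc ++ [col]) acc0)) _ _
          (fun x _ => rank_eq_rkOf fbs rk0 acc0 i0 hinv hilen x)]
    rw [scanB_find, resolveColumnA_eq_find?]
  cases cs with
  | none =>
    exact key PySem.Dict.empty [] 0 (fun x => by simp [rkOf]) (by simp)
  | some s =>
    by_cases hs : s = ""
    · simp only [hs, ne_eq, not_true_eq_false, if_false]
      exact key PySem.Dict.empty [] 0 (fun x => by simp [rkOf]) (by simp)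
    · simp only [ne_eq, hs, not_false_eq_true, if_true]
      exact key (PySem.Dict.empty.insert s 0) [s] 1
        (fun x => by
          by_cases hx : x = s
          · subst hx; rw [PySem.Dict.get?_insert_self]; simp [rkOf]
          · rw [PySem.Dict.get?_insert_of_ne PySem.Dict.empty (0 : Int) hx]
            have hsx : ¬s = x := fun h => hx h.symm
            simp [rkOf, hsx])
        (by simp)
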